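-- pv_equiv track=rewrite | github.com/russosanti/python-ai-course | search/tictactoe/tictactoe.py | check_vertical_win
-- ===== SOURCE A (Python) =====
-- EMPTY = None
--
-- CONSECUTIVETOWIN = 3
--
-- def check_vertical_win(board):
--     # Check winner vertically
--     for column_n in range(len(board[0])):
--         symbol = board[0][column_n]
--         consecutive = 1
--         for row_n in range(1, len(board)):
--             if board[row_n][column_n] is EMPTY:
--                 consecutive = 0
--                 symbol = board[row_n][column_n]
--             if symbol == board[row_n][column_n]:
--                 consecutive = consecutive + 1
--                 if consecutive == CONSECUTIVETOWIN:
--                     return symbol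
--             else:
--                 symbol = board[row_n][column_n]
--                 consecutive = 1
-- ===== SOURCE B (Python) =====
-- EMPTY = None
--
-- CONSECUTIVETOWIN = 3
--
-- def check_vertical_win(board):
--     # Materialize each column as a list, then slide a 3-cell window down it.
--     for c in range(len(board[0])):
--         col = [board[r][c] for r in range(len(board))]
--         while len(col) >= CONSECUTIVETOWIN:
--             v = col[0]
--             if v is not EMPTY and v == col[1] and v == col[2]:
--                 return v
--             col = col[1:]
--     return None
-- ===== Notes on version B (the rewrite author's own statement) =====
-- stated objective: alternative
-- what changed: Replaces A's index-driven symbol/consecutive run-counter state machine (with its EMPTY reset) by materializing each column as a list and sliding a stateless 3-cell window down that list.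
-- outside the precondition, e.g. on check_vertical_win([['X', 'Y'], ['X'], ['X']]): A returns 'X', B returns 'X'
import Mathlib
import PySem

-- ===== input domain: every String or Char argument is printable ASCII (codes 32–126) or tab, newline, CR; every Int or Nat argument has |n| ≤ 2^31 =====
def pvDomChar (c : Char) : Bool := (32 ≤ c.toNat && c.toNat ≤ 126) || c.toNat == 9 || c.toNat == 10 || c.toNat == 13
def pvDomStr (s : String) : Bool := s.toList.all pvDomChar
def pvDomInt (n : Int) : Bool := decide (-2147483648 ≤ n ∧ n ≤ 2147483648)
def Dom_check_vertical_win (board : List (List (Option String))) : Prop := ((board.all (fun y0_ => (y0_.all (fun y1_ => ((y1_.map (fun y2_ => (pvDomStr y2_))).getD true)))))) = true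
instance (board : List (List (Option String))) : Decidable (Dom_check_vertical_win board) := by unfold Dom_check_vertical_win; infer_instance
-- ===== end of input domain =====

-- B replaces A's index-driven run-counter state machine by materializing each column as a
-- list and sliding a stateless 3-cell window down it (same cost; objective: alternative).
-- Return value only; no mutation.

-- ===== PORT A =====

-- board[r][c], defaulting out-of-range to EMPTY; inside Pre_ no access is out of range.
def cvwCellA (board : List (List (Option String))) (r c : Int) : Option String :=
  (PySem.List.pyGet? ((PySem.List.pyGet? board r).getD []) c).getD none

-- inner loop of A: rows = remaining row indices, state (symbol, consecutive);
-- 'some s' = early 'return s', 'none' = fell through the row loop.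
def cvwColA (board : List (List (Option String))) (c : Int) :
    List Int → Option String → Int → Option (Option String)
  | [], _, _ => none
  | r :: rest, symbol, consecutive =>
    let cellv := cvwCellA board r c
    let symbol1 := if cellv = none then cellv else symbol
    let consecutive1 := if cellv = none then 0 else consecutive
    if symbol1 = cellv then
      if consecutive1 + 1 = 3 then some symbol1
      else cvwColA board c rest symbol1 (consecutive1 + 1)
    else cvwColA board c rest cellv 1

-- outer loop of A over column indices
def cvwOuterA (board : List (List (Option String))) : List Int → Option String
  | [] => none
  | c :: rest =>
    match cvwColA board c (PySem.List.pyRange 1 (board.length : Int) 1) (cvwCellA board 0 c) 1 with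
    | some s => s
    | none => cvwOuterA board rest

def check_vertical_win (board : List (List (Option String))) : Option String :=
  cvwOuterA board (PySem.List.pyRange 0 (((PySem.List.pyGet? board 0).getD []).length : Int) 1)

-- ===== PORT B =====

-- Source B's while loop: while len(col) >= 3, test the window col[0..2], else col = col[1:];
-- 'some v' = early 'return v', 'none' = window slid off the end.
def cvwSlide : List (Option String) → Option (Option String)
  | a :: b :: c :: rest =>
    if a ≠ none ∧ a = b ∧ a = c then some a else cvwSlide (b :: c :: rest)
  | _ => none

-- Source B's outer for loop: materialize the column (the comprehension, as a map over the
-- row range), slide the window, else move to the next column.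
def cvwOuterB (board : List (List (Option String))) : List Int → Option String
  | [] => none
  | c :: rest =>
    let col := (PySem.List.pyRange 0 (board.length : Int) 1).map
      (fun r => (PySem.List.pyGet? ((PySem.List.pyGet? board r).getD []) c).getD none)
    match cvwSlide col with
    | some v => v
    | none => cvwOuterB board rest

def check_vertical_win_alt (board : List (List (Option String))) : Option String :=
  cvwOuterB board (PySem.List.pyRange 0 (((PySem.List.pyGet? board 0).getD []).length : Int) 1)

-- ===== PRECONDITION & SPEC =====
-- Pre_ excludes empty boards and ragged boards (a row shorter than row 0), on which
-- Python A raises IndexError unless a win happens to complete before the short row is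
-- reached; B raises on those boards too (at worst at a different moment).
def Pre_check_vertical_win (board : List (List (Option String))) : Prop :=
  board ≠ [] ∧ ∀ row ∈ board, (board.headD []).length ≤ row.length
instance (board : List (List (Option String))) : Decidable (Pre_check_vertical_win board) := by
  unfold Pre_check_vertical_win; infer_instance

def pvWitness_check_vertical_win : List (List (Option String)) :=
  [[some "X"], [some "X"], [some "O"]]

def Spec_check_vertical_win (board : List (List (Option String))) (out : Option String) : Prop := out = check_vertical_win_alt board
instance (board : List (List (Option String))) (out : Option String) : Decidable (Spec_check_vertical_win board out) := by unfold Spec_check_vertical_win; infer_instance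

-- ===== CLAIM (what is proved, stated in full; the proofs are below) =====
def Claim_equal_check_vertical_win : Prop := ∀ (board : List (List (Option String))), Dom_check_vertical_win board → Pre_check_vertical_win board → Spec_check_vertical_win board (check_vertical_win board)

-- ===== LEMMAS AND PROOFS =====

-- A's inner loop on the list of column VALUES (state machine)
def cvwAscan : List (Option String) → Option String → Int → Option (Option String)
  | [], _, _ => none
  | x :: rest, symbol, consecutive =>
    let symbol1 := if x = none then x else symbol
    let consecutive1 := if x = none then 0 else consecutive
    if symbol1 = x then
      if consecutive1 + 1 = 3 then some symbol1
      else cvwAscan rest symbol1 (consecutive1 + 1)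
    else cvwAscan rest x 1

theorem cvwColA_eq_ascan (board : List (List (Option String))) (c : Int) :
    ∀ (rows : List Int) (s : Option String) (k : Int),
      cvwColA board c rows s k = cvwAscan (rows.map (fun r => cvwCellA board r c)) s k := by
  intro rows
  induction rows with
  | nil => intro s k; rfl
  | cons r rest ih =>
    intro s k
    simp only [cvwColA, cvwAscan, List.map_cons]
    split_ifs <;> simp [ih]

-- the core: run-counter scan = sliding-window scan, with the lookback cells in front
theorem cvwAscan_eq_slide :
    ∀ (rest : List (Option String)) (s : Option String),
      (cvwAscan rest s 1 = cvwSlide (s :: rest))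
      ∧ (s ≠ none → cvwAscan rest s 2 = cvwSlide (s :: s :: rest)) := by
  intro rest
  induction rest with
  | nil =>
    intro s
    constructor
    · rfl
    · intro _; rfl
  | cons x rest ih =>
    intro s
    constructor
    · -- consecutive = 1
      by_cases hx : x = none
      · subst hx
        have hA : cvwAscan (none :: rest) s 1 = cvwAscan rest none 1 := by
          simp [cvwAscan]
        rw [hA, (ih none).1]
        cases rest with
        | nil =>
          cases s <;> simp [cvwSlide]
        | cons y rest' =>
          by_cases hs : s = none
          · subst hs; simp [cvwSlide]
          · simp [cvwSlide, hs]
      · by_cases hxs : x = s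
        · subst hxs
          have hA : cvwAscan (x :: rest) x 1 = cvwAscan rest x 2 := by
            simp [cvwAscan, hx]
          rw [hA, (ih x).2 hx]
        · have hsx : s ≠ x := fun h => hxs h.symm
          have hA : cvwAscan (x :: rest) s 1 = cvwAscan rest x 1 := by
            simp [cvwAscan, hx, hsx]
          rw [hA, (ih x).1]
          cases rest with
          | nil => simp [cvwSlide]
          | cons y rest' =>
            simp [cvwSlide, hsx]
    · -- consecutive = 2, s ≠ none
      intro hs
      by_cases hx : x = none
      · subst hx
        have hA : cvwAscan (none :: rest) s 2 = cvwAscan rest none 1 := by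
          simp [cvwAscan]
        rw [hA, (ih none).1]
        have step1 : cvwSlide (s :: s :: none :: rest) = cvwSlide (s :: none :: rest) := by
          simp [cvwSlide, hs]
        rw [step1]
        cases rest with
        | nil => simp [cvwSlide]
        | cons y rest' => simp [cvwSlide, hs]
      · by_cases hxs : x = s
        · subst hxs
          have hA : cvwAscan (x :: rest) x 2 = some x := by
            simp [cvwAscan, hx]
          rw [hA]
          simp [cvwSlide, hx]
        · have hsx : s ≠ x := fun h => hxs h.symm
          have hA : cvwAscan (x :: rest) s 2 = cvwAscan rest x 1 := by
            simp [cvwAscan, hx, hsx]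
          rw [hA, (ih x).1]
          have step1 : cvwSlide (s :: s :: x :: rest) = cvwSlide (s :: x :: rest) := by
            simp [cvwSlide, hsx]
          rw [step1]
          cases rest with
          | nil => simp [cvwSlide]
          | cons y rest' =>
            simp [cvwSlide, hsx]

-- per-column: A's inner loop result = B's window scan of the materialized column
theorem cvwCol_eq (board : List (List (Option String))) (hne : board ≠ []) (c : Int) :
    cvwColA board c (PySem.List.pyRange 1 (board.length : Int) 1) (cvwCellA board 0 c) 1
      = cvwSlide ((PySem.List.pyRange 0 (board.length : Int) 1).map
          (fun r => (PySem.List.pyGet? ((PySem.List.pyGet? board r).getD []) c).getD none)) := by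
  have hlen : (1 : Int) ≤ (board.length : Int) := by
    have : board.length ≠ 0 := by simpa using hne
    omega
  rw [cvwColA_eq_ascan, (cvwAscan_eq_slide _ _).1]
  have hcons : PySem.List.pyRange 0 (board.length : Int) 1
      = 0 :: PySem.List.pyRange 1 (board.length : Int) 1 := by
    have := PySem.List.pyRange_one_cons (a := 0) (b := (board.length : Int)) (by omega)
    simpa using this
  rw [hcons]
  rfl

theorem cvwOuter_eq (board : List (List (Option String))) (hne : board ≠ []) :
    ∀ (cols : List Int), cvwOuterA board cols = cvwOuterB board cols := by
  intro cols
  induction cols with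
  | nil => rfl
  | cons c rest ih =>
    simp only [cvwOuterA, cvwOuterB]
    rw [cvwCol_eq board hne c, ih]

-- ===== VERDICT (by name: the statement is the Claim_ definition above) =====
theorem check_vertical_win_spec : Claim_equal_check_vertical_win := by
  intro board _hdom hpre
  unfold Spec_check_vertical_win check_vertical_win check_vertical_win_alt
  exact cvwOuter_eq board hpre.1 _
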